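-- pv_equiv track=rewrite | github.com/StanfordAHA/lake | tests/test_lake.py | transform_strides_and_ranges
-- ===== SOURCE A (Python) =====
-- def transform_strides_and_ranges(ranges, strides, dimensionality):
--     assert len(ranges) == len(strides), "Strides and ranges should be same length..."
--     tform_ranges = [range_item - 2 for range_item in ranges[0:dimensionality]]
--     range_sub_1 = [range_item - 1 for range_item in ranges]
--     tform_strides = [strides[0]]
--     offset = 0
--     for i in range(dimensionality - 1):
--         offset -= (range_sub_1[i] * strides[i])
--         tform_strides.append(strides[i + 1] + offset)
--     for j in range(len(ranges) - dimensionality):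
--         tform_strides.append(0)
--         tform_ranges.append(0)
--     return (tform_ranges, tform_strides)
-- ===== SOURCE B (Python) =====
-- def transform_strides_and_ranges(ranges, strides, dimensionality):
--     assert len(ranges) == len(strides), "Strides and ranges should be same length..."
--     n = len(ranges)
--     pad = [0] * (n - dimensionality)
--     tform_strides = [strides[0]] + [
--         strides[i] - sum((ranges[j] - 1) * strides[j] for j in range(i))
--         for i in range(1, dimensionality)
--     ] + pad
--     tform_ranges = [r - 2 for r in ranges[:dimensionality]] + pad
--     return (tform_ranges, tform_strides)
-- ===== Notes on version B (the rewrite author's own statement) =====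
-- stated objective: alternative
-- what changed: Replaces A's stateful running-offset loop (one accumulator threaded across iterations, appending to a growing list) by a direct closed-form formula: each output stride i is computed independently as strides[i] minus the full sum over j<i of (ranges[j]-1)*strides[j], a naive O(n^2) per-element evaluation with no shared state, and the padding comes from list multiplication and concatenation.
import Mathlib
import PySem

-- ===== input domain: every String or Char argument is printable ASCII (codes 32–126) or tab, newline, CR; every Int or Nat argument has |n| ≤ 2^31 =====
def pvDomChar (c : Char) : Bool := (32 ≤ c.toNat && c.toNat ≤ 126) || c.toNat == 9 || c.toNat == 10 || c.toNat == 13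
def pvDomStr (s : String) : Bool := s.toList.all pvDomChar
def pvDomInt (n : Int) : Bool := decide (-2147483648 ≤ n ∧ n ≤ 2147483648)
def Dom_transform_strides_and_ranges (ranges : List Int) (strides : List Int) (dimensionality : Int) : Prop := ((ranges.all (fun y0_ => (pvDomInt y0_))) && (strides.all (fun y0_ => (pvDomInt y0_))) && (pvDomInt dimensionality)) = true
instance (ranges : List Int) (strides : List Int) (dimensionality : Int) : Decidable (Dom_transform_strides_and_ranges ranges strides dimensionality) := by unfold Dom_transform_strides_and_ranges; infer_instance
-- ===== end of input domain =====

-- B replaces A's stateful running-offset loop by a closed-form per-element formula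
-- (each output stride computed independently by an inner sum; objective: alternative).


-- ===== PORT A =====
def transform_strides_and_ranges (ranges : List Int) (strides : List Int) (dimensionality : Int) : List Int × List Int :=
  -- tform_ranges = [range_item - 2 for range_item in ranges[0:dimensionality]]
  let tform_ranges := (PySem.List.slice ranges (some 0) (some dimensionality)).map (fun range_item => range_item - 2)
  -- range_sub_1 = [range_item - 1 for range_item in ranges]
  let range_sub_1 := ranges.map (fun range_item => range_item - 1)
  -- tform_strides = [strides[0]]  (strides[0] raises on empty strides: Pre_ requires strides ≠ [])
  let tform_strides : List Int := [PySem.List.pyGetD strides 0 0]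
  -- offset = 0; for i in range(dimensionality - 1): …  (indexing in range under Pre_)
  let st := (PySem.List.pyRange 0 (dimensionality - 1) 1).foldl
    (fun (st : Int × List Int) i =>
      let offset := st.1 - (PySem.List.pyGetD range_sub_1 i 0) * (PySem.List.pyGetD strides i 0)
      (offset, st.2 ++ [PySem.List.pyGetD strides (i + 1) 0 + offset]))
    (0, tform_strides)
  -- for j in range(len(ranges) - dimensionality): append 0 to both
  let fin := (PySem.List.pyRange 0 ((ranges.length : Int) - dimensionality) 1).foldl
    (fun (p : List Int × List Int) _ => (p.1 ++ [0], p.2 ++ [0]))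
    (tform_ranges, st.2)
  (fin.1, fin.2)

-- ===== PORT B =====
def transform_strides_and_ranges_alt (ranges : List Int) (strides : List Int) (dimensionality : Int) : List Int × List Int :=
  let n : Int := ranges.length
  -- pad = [0] * (n - dimensionality)
  let pad : List Int := List.replicate (n - dimensionality).toNat 0
  -- tform_strides = [strides[0]] + [strides[i] - sum((ranges[j]-1)*strides[j] for j in range(i))
  --                                 for i in range(1, dimensionality)] + pad
  let tform_strides := [PySem.List.pyGetD strides 0 0] ++
    (PySem.List.pyRange 1 dimensionality 1).map (fun i =>
      PySem.List.pyGetD strides i 0 -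
        ((PySem.List.pyRange 0 i 1).map (fun j =>
          (PySem.List.pyGetD ranges j 0 - 1) * PySem.List.pyGetD strides j 0)).sum) ++ pad
  -- tform_ranges = [r - 2 for r in ranges[:dimensionality]] + pad
  let tform_ranges := (PySem.List.slice ranges none (some dimensionality)).map (fun r => r - 2) ++ pad
  (tform_ranges, tform_strides)

-- ===== PRECONDITION & SPEC =====
-- Pre_ admits exactly the inputs on which A returns: equal lengths (the assert), a nonempty
-- strides (strides[0] raises IndexError on []), and dimensionality ≤ len(ranges) (otherwise
-- the first loop indexes strides[i+1] past the end, IndexError).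
def Pre_transform_strides_and_ranges (ranges : List Int) (strides : List Int) (dimensionality : Int) : Prop :=
  ranges.length = strides.length ∧ strides ≠ [] ∧ dimensionality ≤ (ranges.length : Int)
instance (ranges : List Int) (strides : List Int) (dimensionality : Int) : Decidable (Pre_transform_strides_and_ranges ranges strides dimensionality) := by unfold Pre_transform_strides_and_ranges; infer_instance

def pvWitness_transform_strides_and_ranges : List Int × List Int × Int := ([4, 5, 6], [1, 3, 12], 3)

def Spec_transform_strides_and_ranges (ranges : List Int) (strides : List Int) (dimensionality : Int) (out : List Int × List Int) : Prop := out = transform_strides_and_ranges_alt ranges strides dimensionality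
instance (ranges : List Int) (strides : List Int) (dimensionality : Int) (out : List Int × List Int) : Decidable (Spec_transform_strides_and_ranges ranges strides dimensionality out) := by unfold Spec_transform_strides_and_ranges; infer_instance

-- ===== CLAIM (what is proved, stated in full; the proofs are below) =====
def Claim_equal_transform_strides_and_ranges : Prop := ∀ (ranges : List Int) (strides : List Int) (dimensionality : Int), Dom_transform_strides_and_ranges ranges strides dimensionality → Pre_transform_strides_and_ranges ranges strides dimensionality → Spec_transform_strides_and_ranges ranges strides dimensionality (transform_strides_and_ranges ranges strides dimensionality)

-- ===== LEMMAS AND PROOFS =====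

-- A's second loop appends zeros to both lists: it is an append of replicated zeros.
theorem pv_pad_fold (L : List Int) (tr ts : List Int) :
    L.foldl (fun (p : List Int × List Int) _ => (p.1 ++ [0], p.2 ++ [0])) (tr, ts)
      = (tr ++ List.replicate L.length 0, ts ++ List.replicate L.length 0) := by
  induction L generalizing tr ts with
  | nil => simp
  | cons x L ih =>
      simp only [List.foldl_cons, ih, List.length_cons, List.replicate_succ]
      simp [List.append_assoc]

-- A's main loop, characterised as offset = minus a prefix sum and an appended map.
theorem pv_loopA (u v : Int → Int) :
    ∀ (m : Nat) (l : List Int),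
    (PySem.List.pyRange 0 (m : Int) 1).foldl
      (fun (st : Int × List Int) i =>
        let offset := st.1 - u i * v i
        (offset, st.2 ++ [v (i + 1) + offset])) (0, l)
      = (0 - ((List.range m).map (fun (j : Nat) => u j * v j)).sum,
         l ++ (List.range m).map (fun (i : Nat) => v (i + 1) + (0 - ((List.range (i + 1)).map (fun (j : Nat) => u j * v j)).sum))) := by
  intro m
  induction m with
  | zero => intro l; simp [PySem.List.pyRange_one_eq_nil]
  | succ m ih =>
      intro l
      rw [show ((m + 1 : Nat) : Int) = (m : Int) + 1 by omega,
        PySem.List.pyRange_one_succ_right (a := 0) (b := (m : Int)) (by omega), List.foldl_append, ih]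
      simp only [List.foldl_cons, List.foldl_nil]
      rw [List.range_succ, List.map_append, List.map_append, List.sum_append]
      simp only [List.map_cons, List.map_nil, List.sum_cons, List.sum_nil]
      simp only [Prod.mk.injEq]
      constructor
      · ring
      · rw [List.append_assoc]
        congr 3
        rw [List.range_succ, List.map_append, List.sum_append]
        simp only [List.map_cons, List.map_nil, List.sum_cons, List.sum_nil]
        ring

-- range(1, m+1) as a shifted List.range m.
theorem pv_range_shift (m : Nat) :
    PySem.List.pyRange 1 ((m : Int) + 1) 1 = (List.range m).map (fun (k : Nat) => 1 + (k : Int)) := by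
  rw [PySem.List.pyRange_one]
  norm_num

-- range(0, n) as List.range n.
theorem pv_range_cast (n : Nat) :
    PySem.List.pyRange 0 ((n : Int)) 1 = (List.range n).map (fun (j : Nat) => (j : Int)) := by
  rw [PySem.List.pyRange_one]
  norm_num

-- ===== VERDICT (by name: the statement is the Claim_ definition above) =====
theorem transform_strides_and_ranges_spec : Claim_equal_transform_strides_and_ranges := by
  intro r s d _ hpre
  obtain ⟨hlen, hne, hd⟩ := hpre
  have hs0 : 0 < s.length := List.length_pos_iff.mpr hne
  unfold Spec_transform_strides_and_ranges
  unfold transform_strides_and_ranges transform_strides_and_ranges_alt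
  simp only []
  rw [pv_pad_fold, PySem.List.length_pyRange_one]
  simp only [Prod.mk.injEq]
  constructor
  · -- first components: the slices agree, the pads agree
    simp [PySem.List.slice_zero_start]
  · -- second components
    set m : Nat := (d - 1).toNat with hmdef
    by_cases hd1 : d ≥ 1
    · -- main case
      have hm : ((m : Nat) : Int) = d - 1 := Int.toNat_of_nonneg (by omega)
      have hmr : m ≤ r.length := by omega
      have hms : m < s.length := by omega
      -- A's loop
      rw [show PySem.List.pyRange 0 (d - 1) = PySem.List.pyRange 0 ((m : Nat) : Int) by rw [hm]]
      rw [pv_loopA (fun i => PySem.List.pyGetD (r.map (fun x => x - 1)) i 0)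
            (fun i => PySem.List.pyGetD s i 0) m]
      -- B's outer comprehension: range(1, d) as a shifted List.range m
      rw [show PySem.List.pyRange 1 d 1 = PySem.List.pyRange 1 ((m : Int) + 1) 1 by
            rw [show ((m : Int) + 1) = d by omega], pv_range_shift]
      dsimp only
      rw [List.map_map]
      simp only [List.append_assoc]
      congr 1
      congr 1
      refine List.map_congr_left (fun i hi => ?_)
      have him : i < m := List.mem_range.mp hi
      -- inner sum: range(1+i) as List.range (i+1)
      have hinner : PySem.List.pyRange 0 (1 + (i : Int)) 1
          = (List.range (i + 1)).map (fun (j : Nat) => (j : Int)) := by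
        rw [show (1 + (i : Int)) = (((i + 1 : Nat) : Int)) by omega, pv_range_cast]
      simp only [Function.comp_def, hinner, List.map_map]
      have hterm : ∀ j : Nat, j < i + 1 →
          (PySem.List.pyGetD r (j : Int) 0 - 1) * PySem.List.pyGetD s (j : Int) 0
            = PySem.List.pyGetD (r.map (fun x => x - 1)) (j : Int) 0 * PySem.List.pyGetD s (j : Int) 0 := by
        intro j hj
        have hjr : j < r.length := by omega
        congr 1
        simp [PySem.List.pyGetD_natCast, List.getD, List.getElem?_eq_getElem hjr,
          List.getElem?_map]
      rw [List.map_congr_left (fun j hj => hterm j (List.mem_range.mp hj))]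
      have hcast : (1 : Int) + (i : Int) = ((i : Nat) : Int) + 1 := by omega
      rw [hcast]
      ring
      norm_num
    · -- dimensionality ≤ 0: both comprehensions are empty
      rw [PySem.List.pyRange_one_eq_nil (show d - 1 ≤ 0 by omega),
          PySem.List.pyRange_one_eq_nil (show d ≤ 1 by omega)]
      simp
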